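-- pv_equiv track=rewrite | github.com/sainihimanshu1999/Data-Structures | Practice - DS-New/sumofupperandlowertriangleinamatrix.py | sumTriangles
-- ===== SOURCE A (Python) =====
-- def sumTriangles(matrix, n):
--     su = 0
--     sl = 0
--     for i in range(n):
--         for j in range(n):
--             if(i<=j):
--                 su += matrix[i][j]
--
--     for i in range(n):
--         for j in range(n):
--             if(j<=i):
--                 sl += matrix[i][j]
--
--     return(su,sl)
-- ===== SOURCE B (Python) =====
-- def sumTriangles(matrix, n):
--     # One pass over the rows; per row, the upper-triangle part is the slice
--     # row[i:n] and the lower-triangle part is the slice row[:i+1].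
--     su = 0
--     sl = 0
--     for i in range(n):
--         row = matrix[i]
--         su += sum(row[i:n])
--         sl += sum(row[:i+1])
--     return (su, sl)
-- ===== Notes on version B (the rewrite author's own statement) =====
-- stated objective: simpler
-- what changed: Replaces A's two independent nested loops with a per-cell triangle test by one pass over the rows that sums the two triangle slices row[i:n] and row[:i+1] directly.
import Mathlib
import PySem

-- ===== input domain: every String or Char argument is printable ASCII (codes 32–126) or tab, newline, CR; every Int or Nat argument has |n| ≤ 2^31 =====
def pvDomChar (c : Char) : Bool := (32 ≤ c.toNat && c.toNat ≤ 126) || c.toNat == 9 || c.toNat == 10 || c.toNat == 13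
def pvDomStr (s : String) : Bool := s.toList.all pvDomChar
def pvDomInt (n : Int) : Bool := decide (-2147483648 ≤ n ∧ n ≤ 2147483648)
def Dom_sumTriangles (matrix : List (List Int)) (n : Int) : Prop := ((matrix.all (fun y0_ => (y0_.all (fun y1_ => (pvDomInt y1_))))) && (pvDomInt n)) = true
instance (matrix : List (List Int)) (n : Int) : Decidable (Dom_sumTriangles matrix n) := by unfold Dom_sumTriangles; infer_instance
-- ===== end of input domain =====

-- B replaces A's two nested index loops (per-cell triangle test) by a single pass over the
-- rows summing the slices row[i:n] and row[:i+1]; objective: simpler. Return values only.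

-- ===== PORT A =====
def sumTriangles (matrix : List (List Int)) (n : Int) : Int × Int :=
  -- su accumulated by the first pair of nested loops, sl by the second
  let su : Int := (PySem.List.pyRange 0 n 1).foldl (fun su i =>
    (PySem.List.pyRange 0 n 1).foldl (fun su j =>
      if i ≤ j then su + PySem.List.pyGetD (PySem.List.pyGetD matrix i []) j 0 else su) su) 0
  let sl : Int := (PySem.List.pyRange 0 n 1).foldl (fun sl i =>
    (PySem.List.pyRange 0 n 1).foldl (fun sl j =>
      if j ≤ i then sl + PySem.List.pyGetD (PySem.List.pyGetD matrix i []) j 0 else sl) sl) 0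
  (su, sl)

-- ===== PORT B =====
def sumTriangles_alt (matrix : List (List Int)) (n : Int) : Int × Int :=
  (PySem.List.pyRange 0 n 1).foldl (fun p i =>
    let row := PySem.List.pyGetD matrix i []
    (p.1 + (PySem.List.slice row (some i) (some n)).sum,
     p.2 + (PySem.List.slice row none (some (i + 1))).sum)) (0, 0)

-- ===== PRECONDITION & SPEC =====
-- Pre_ excludes exactly the inputs on which A raises IndexError: n exceeding the number of
-- rows, or one of the first n rows shorter than n.
def Pre_sumTriangles (matrix : List (List Int)) (n : Int) : Prop :=
  n ≤ matrix.length ∧ ∀ row ∈ matrix.take n.toNat, n ≤ row.length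
instance (matrix : List (List Int)) (n : Int) : Decidable (Pre_sumTriangles matrix n) := by
  unfold Pre_sumTriangles; infer_instance
def pvWitness_sumTriangles : List (List Int) × Int := ([[1, 2], [3, 4]], 2)

def Spec_sumTriangles (matrix : List (List Int)) (n : Int) (out : Int × Int) : Prop := out = sumTriangles_alt matrix n
instance (matrix : List (List Int)) (n : Int) (out : Int × Int) : Decidable (Spec_sumTriangles matrix n out) := by unfold Spec_sumTriangles; infer_instance

-- ===== CLAIM (what is proved, stated in full; the proofs are below) =====
def Claim_equal_sumTriangles : Prop := ∀ (matrix : List (List Int)) (n : Int), Dom_sumTriangles matrix n → Pre_sumTriangles matrix n → Spec_sumTriangles matrix n (sumTriangles matrix n)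

-- ===== LEMMAS AND PROOFS =====

-- (xs.take (k+1)).sum = (xs.take k).sum + xs.getD k 0
theorem pv_take_succ_sum (xs : List Int) (k : Nat) :
    (xs.take (k + 1)).sum = (xs.take k).sum + xs.getD k 0 := by
  rw [List.take_add_one, List.sum_append, List.getD]
  cases h : xs[k]?
  · simp
  · simp

theorem pv_foldl_if_add {α : Type} (l : List α) (P : α → Prop) [DecidablePred P]
    (g : α → Int) (s : Int) :
    l.foldl (fun s x => if P x then s + g x else s) s
      = s + (l.map (fun x => if P x then g x else 0)).sum := by
  induction l generalizing s with
  | nil => simp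
  | cons x xs ih =>
    simp only [List.foldl_cons, List.map_cons, List.sum_cons]
    by_cases h : P x
    · simp [h, ih]; ring
    · simp [h, ih]

theorem pv_upper_sum (row : List Int) (i m : Nat) :
    ((List.range m).map (fun j => if i ≤ j then row.getD j 0 else 0)).sum
      = ((row.drop i).take (m - i)).sum := by
  induction m with
  | zero => simp
  | succ m ih =>
    rw [List.range_succ, List.map_append, List.sum_append, ih]
    simp only [List.map_cons, List.map_nil, List.sum_cons, List.sum_nil, add_zero]
    by_cases h : i ≤ m
    · have hm : m + 1 - i = (m - i) + 1 := by omega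
      rw [if_pos h, hm, pv_take_succ_sum]
      congr 1
      rw [List.getD, List.getD, List.getElem?_drop]
      have him : i + (m - i) = m := by omega
      rw [him]
    · have hm : m + 1 - i = m - i := by omega
      rw [if_neg h, hm, add_zero]

theorem pv_lower_sum (row : List Int) (i m : Nat) :
    ((List.range m).map (fun j => if j ≤ i then row.getD j 0 else 0)).sum
      = (row.take (min (i + 1) m)).sum := by
  induction m with
  | zero => simp
  | succ m ih =>
    rw [List.range_succ, List.map_append, List.sum_append, ih]
    simp only [List.map_cons, List.map_nil, List.sum_cons, List.sum_nil, add_zero]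
    by_cases h : m ≤ i
    · have h1 : min (i + 1) m = m := by omega
      have h2 : min (i + 1) (m + 1) = m + 1 := by omega
      rw [if_pos h, h1, h2, pv_take_succ_sum]
    · have h12 : min (i + 1) m = min (i + 1) (m + 1) := by omega
      rw [if_neg h, add_zero, h12]

-- ===== VERDICT (by name: the statement is the Claim_ definition above) =====
theorem sumTriangles_spec : Claim_equal_sumTriangles := by
  intro matrix n _ hpre
  unfold Spec_sumTriangles sumTriangles sumTriangles_alt
  obtain ⟨hlen, hrows⟩ := hpre
  set m : Nat := n.toNat with hm
  -- rewrite pyRange into (List.range m).map Nat-cast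
  have hrange : PySem.List.pyRange 0 n 1 = List.map (fun (k : Nat) => (k : Int)) (List.range m) := by
    rw [PySem.List.pyRange_one]
    have h0 : (n - 0).toNat = m := by omega
    rw [h0]
    exact List.map_congr_left (fun k _ => by ring)
  rw [hrange]
  simp only [List.foldl_map, PySem.List.pyGetD_natCast]
  -- B side: compute the slices over Nat indices
  have hB : ∀ (p : Int × Int) (i : Nat), i ∈ List.range m →
      (fun (p : Int × Int) (i : Nat) =>
        (p.1 + (PySem.List.slice (matrix.getD i []) (some (i : Int)) (some n)).sum,
         p.2 + (PySem.List.slice (matrix.getD i []) none (some ((i : Int) + 1))).sum)) p i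
      = (p.1 + (((matrix.getD i []).drop i).take (m - i)).sum,
         p.2 + ((matrix.getD i []).take (i + 1)).sum) := by
    intro p i hi
    have him : i < m := List.mem_range.mp hi
    have hn : (n : Int) = ((m : Nat) : Int) := by omega
    have h1 : PySem.List.slice (matrix.getD i []) (some (i : Int)) (some n)
        = ((matrix.getD i []).drop i).take (m - i) := by
      rw [hn, PySem.List.slice_natCast]
    have h2 : PySem.List.slice (matrix.getD i []) none (some ((i : Int) + 1))
        = (matrix.getD i []).take (i + 1) := by
      have hc : (i : Int) + 1 = (((i + 1 : Nat)) : Int) := by push_cast; ring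
      rw [hc, PySem.List.slice_to_natCast]
    simp only [h1, h2]
  -- A side: each inner loop is a segment sum
  have hAu : ∀ (s : Int) (i : Nat),
      (List.range m).foldl (fun s (k : Nat) =>
          if (i : Int) ≤ (k : Int) then s + (matrix.getD i []).getD k 0 else s) s
        = s + (((matrix.getD i []).drop i).take (m - i)).sum := by
    intro s i
    rw [pv_foldl_if_add (List.range m) (fun (k : Nat) => (i : Int) ≤ (k : Int))
      (fun k => (matrix.getD i []).getD k 0) s]
    congr 1
    rw [← pv_upper_sum (matrix.getD i []) i m]
    congr 1
    refine List.map_congr_left (fun j _ => ?_)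
    by_cases h : i ≤ j
    · simp [h]
    · simp [h]
  have hAl : ∀ (s : Int) (i : Nat),
      (List.range m).foldl (fun s (k : Nat) =>
          if (k : Int) ≤ (i : Int) then s + (matrix.getD i []).getD k 0 else s) s
        = s + ((matrix.getD i []).take (min (i + 1) m)).sum := by
    intro s i
    rw [pv_foldl_if_add (List.range m) (fun (k : Nat) => (k : Int) ≤ (i : Int))
      (fun k => (matrix.getD i []).getD k 0) s]
    congr 1
    rw [← pv_lower_sum (matrix.getD i []) i m]
    congr 1
    refine List.map_congr_left (fun j _ => ?_)
    by_cases h : j ≤ i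
    · simp [h]
    · simp [h]
  -- split B's paired fold into two independent folds and identify each with A's
  have hsplit : (List.range m).foldl (fun (p : Int × Int) (i : Nat) =>
      (p.1 + (PySem.List.slice (matrix.getD i []) (some (i : Int)) (some n)).sum,
       p.2 + (PySem.List.slice (matrix.getD i []) none (some ((i : Int) + 1))).sum)) (0, 0)
      = (List.range m).foldl (fun (p : Int × Int) (i : Nat) =>
      (p.1 + (((matrix.getD i []).drop i).take (m - i)).sum,
       p.2 + ((matrix.getD i []).take (i + 1)).sum)) (0, 0) :=
    PySem.List.foldl_congr_mem _ _ _ _ (fun p i hi => hB p i hi)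
  rw [hsplit, PySem.List.foldl_prod_mk
    (fun (s : Int) (i : Nat) => s + (((matrix.getD i []).drop i).take (m - i)).sum)
    (fun (s : Int) (i : Nat) => s + ((matrix.getD i []).take (i + 1)).sum)
    (List.range m) 0 0]
  refine Prod.ext ?_ ?_
  · exact PySem.List.foldl_congr_mem _ _ _ _ (fun s i _ => hAu s i)
  · refine PySem.List.foldl_congr_mem _ _ _ _ (fun s i hi => ?_)
    rw [hAl s i]
    have hmin : min (i + 1) m = i + 1 := by
      have := List.mem_range.mp hi; omega
    rw [hmin]
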